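-- pv_equiv track=rewrite | github.com/Kai-ruri/MahjongAI | mahjong_engine.py | check_iipeikou
-- ===== SOURCE A (Python) =====
-- def check_iipeikou(closed_mentsu, fixed_mentsu):
--     """一盃口(1翻) / 二盃口(3翻)：門前のみ"""
--     if len(fixed_mentsu) > 0:
--         return 0
--     shuntsu_list = [f"{m[0]}-{m[1]}-{m[2]}" for m in closed_mentsu if m[0] != m[1]]
--     from collections import Counter
--     cnt = Counter(shuntsu_list)
--     pairs_count = sum(v // 2 for v in cnt.values())
--     if pairs_count >= 2:
--         return 3  # 二盃口
--     elif pairs_count == 1: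
--         return 1  # 一盃口
--     return 0
-- ===== SOURCE B (Python) =====
-- def check_iipeikou(closed_mentsu, fixed_mentsu):
--     """一盃口(1翻) / 二盃口(3翻)：門前のみ"""
--     if len(fixed_mentsu) > 0:
--         return 0
--     runs = sorted((m[0], m[1], m[2]) for m in closed_mentsu if m[0] != m[1])
--     pairs_count = 0
--     i = 0
--     while i + 1 < len(runs):
--         if runs[i] == runs[i + 1]:
--             pairs_count += 1
--             i += 2
--         else:
--             i += 1
--     if pairs_count >= 2:
--         return 3
--     elif pairs_count == 1:
--         return 1
--     return 0
-- ===== Notes on version B (the rewrite author's own statement) =====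
-- stated objective: alternative
-- what changed: Replaces A's per-meld string formatting plus Counter multiset tally with sorting the shuntsu tuples and one greedy scan that pairs adjacent equal entries (in a sorted list equal tuples are contiguous, so pairing adjacent duplicates yields exactly count//2 per group).
import Mathlib
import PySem

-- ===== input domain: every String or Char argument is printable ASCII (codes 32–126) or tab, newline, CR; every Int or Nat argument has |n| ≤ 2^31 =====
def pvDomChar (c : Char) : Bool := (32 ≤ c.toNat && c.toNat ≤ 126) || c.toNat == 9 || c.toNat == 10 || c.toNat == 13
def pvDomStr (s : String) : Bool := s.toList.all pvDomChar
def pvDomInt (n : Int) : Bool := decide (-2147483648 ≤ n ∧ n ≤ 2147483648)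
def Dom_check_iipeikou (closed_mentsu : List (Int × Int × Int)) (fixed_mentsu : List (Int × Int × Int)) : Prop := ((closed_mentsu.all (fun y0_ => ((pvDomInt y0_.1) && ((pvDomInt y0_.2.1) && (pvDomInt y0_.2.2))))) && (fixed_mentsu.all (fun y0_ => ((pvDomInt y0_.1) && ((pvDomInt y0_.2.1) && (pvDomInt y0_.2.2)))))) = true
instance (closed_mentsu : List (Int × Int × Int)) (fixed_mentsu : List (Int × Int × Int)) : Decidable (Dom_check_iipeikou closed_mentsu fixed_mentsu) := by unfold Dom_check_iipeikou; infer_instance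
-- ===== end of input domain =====

-- B replaces A's per-meld string formatting + Counter tally with: sort the shuntsu tuples
-- (Python's lexicographic tuple order) and make one greedy scan pairing adjacent equal
-- entries; same return value.

-- ===== PORT A =====
-- the f-string key f"{m[0]}-{m[1]}-{m[2]}", represented as its exact list of characters
def keyA (m : Int × Int × Int) : List Char :=
  PySem.Int.toChars m.1 ++ '-' :: (PySem.Int.toChars m.2.1 ++ '-' :: PySem.Int.toChars m.2.2)

def check_iipeikou (closed_mentsu : List (Int × Int × Int)) (fixed_mentsu : List (Int × Int × Int)) : Int :=
  if fixed_mentsu.length > 0 then 0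
  else
    let shuntsu_list := (closed_mentsu.filter (fun m => m.1 != m.2.1)).map keyA
    let cnt := PySem.Dict.counter shuntsu_list
    let pairs_count := (cnt.values.map (fun v => PySem.Int.floordiv v 2)).sum
    if pairs_count ≥ 2 then 3
    else if pairs_count = 1 then 1
    else 0

-- ===== PORT B =====
-- Python's lexicographic order on 3-tuples of ints, as the sort key
def tkey (m : Int × Int × Int) : Int ×ₗ Int ×ₗ Int := toLex (m.1, toLex (m.2.1, m.2.2))

-- the while loop: walk the sorted list; an adjacent equal pair counts 1 and skips both
def countPairs : List (Int × Int × Int) → Int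
  | a :: b :: t => if a == b then 1 + countPairs t else countPairs (b :: t)
  | _ => 0

def check_iipeikou_alt (closed_mentsu : List (Int × Int × Int)) (fixed_mentsu : List (Int × Int × Int)) : Int :=
  if fixed_mentsu.length > 0 then 0
  else
    let runs := PySem.List.sorted
      ((closed_mentsu.filter (fun m => m.1 != m.2.1)).map (fun m => (m.1, m.2.1, m.2.2)))
      tkey false
    let pairs_count := countPairs runs
    if pairs_count ≥ 2 then 3
    else if pairs_count = 1 then 1
    else 0

-- ===== PRECONDITION & SPEC =====
def Spec_check_iipeikou (closed_mentsu : List (Int × Int × Int)) (fixed_mentsu : List (Int × Int × Int)) (out : Int) : Prop := out = check_iipeikou_alt closed_mentsu fixed_mentsu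
instance (closed_mentsu : List (Int × Int × Int)) (fixed_mentsu : List (Int × Int × Int)) (out : Int) : Decidable (Spec_check_iipeikou closed_mentsu fixed_mentsu out) := by unfold Spec_check_iipeikou; infer_instance

-- ===== CLAIM (what is proved, stated in full; the proofs are below) =====
def Claim_equal_check_iipeikou : Prop := ∀ (closed_mentsu : List (Int × Int × Int)) (fixed_mentsu : List (Int × Int × Int)), Dom_check_iipeikou closed_mentsu fixed_mentsu → Spec_check_iipeikou closed_mentsu fixed_mentsu (check_iipeikou closed_mentsu fixed_mentsu)

-- ===== LEMMAS AND PROOFS =====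

/- ## Facts about `Nat.toDigits 10` / `PySem.Int.toChars`: every character is a decimal digit,
   the list is nonempty, and the rendering is injective (via a decode round-trip). -/

theorem toDigitsCore_acc (f : Nat) : ∀ (n : Nat) (acc : List Char),
    Nat.toDigitsCore 10 f n acc = Nat.toDigitsCore 10 f n [] ++ acc := by
  induction f with
  | zero => intro n acc; simp [Nat.toDigitsCore]
  | succ f ih =>
    intro n acc
    simp only [Nat.toDigitsCore]
    by_cases h : n / 10 = 0
    · simp [h]
    · simp only [h]
      rw [ih (n / 10) [(n % 10).digitChar], ih (n / 10) ((n % 10).digitChar :: acc)]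
      simp

theorem digitChar_isDigit {r : Nat} (h : r < 10) : (Nat.digitChar r).isDigit = true := by
  interval_cases r <;> decide

theorem toDigitsCore_digits (f : Nat) : ∀ (n : Nat) (acc : List Char),
    (∀ c ∈ acc, c.isDigit = true) → ∀ c ∈ Nat.toDigitsCore 10 f n acc, c.isDigit = true := by
  induction f with
  | zero => intro n acc hacc; simpa [Nat.toDigitsCore] using hacc
  | succ f ih =>
    intro n acc hacc c hc
    simp only [Nat.toDigitsCore] at hc
    by_cases h : n / 10 = 0
    · simp only [h] at hc
      rcases List.mem_cons.mp hc with rfl | hc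
      · exact digitChar_isDigit (Nat.mod_lt _ (by norm_num))
      · exact hacc _ hc
    · rw [if_neg h] at hc
      refine ih (n / 10) _ ?_ c hc
      intro c' hc'
      rcases List.mem_cons.mp hc' with rfl | hc'
      · exact digitChar_isDigit (Nat.mod_lt _ (by norm_num))
      · exact hacc _ hc'

theorem toDigits_digits (n : Nat) : ∀ c ∈ Nat.toDigits 10 n, c.isDigit = true :=
  toDigitsCore_digits (n + 1) n [] (by simp)

theorem toDigits_ne_nil (n : Nat) : Nat.toDigits 10 n ≠ [] := by
  show Nat.toDigitsCore 10 (n + 1) n [] ≠ []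
  simp only [Nat.toDigitsCore]
  by_cases h : n / 10 = 0
  · simp [h]
  · rw [if_neg h, toDigitsCore_acc]
    simp

def decDigits (l : List Char) : Nat := l.foldl (fun a c => 10 * a + (c.toNat - 48)) 0

theorem digitChar_toNat {r : Nat} (h : r < 10) : (Nat.digitChar r).toNat = r + 48 := by
  interval_cases r <;> decide

theorem decDigits_toDigitsCore (f : Nat) : ∀ n : Nat, n < f →
    decDigits (Nat.toDigitsCore 10 f n []) = n := by
  induction f with
  | zero => omega
  | succ f ih =>
    intro n hn
    simp only [Nat.toDigitsCore]
    by_cases h : n / 10 = 0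
    · rw [if_pos h]
      simp [decDigits, digitChar_toNat (Nat.mod_lt n (by norm_num))]
      omega
    · rw [if_neg h, toDigitsCore_acc]
      have hlt : n / 10 < f := by omega
      have := ih (n / 10) hlt
      simp only [decDigits, List.foldl_append, List.foldl_cons, List.foldl_nil] at *
      rw [this, digitChar_toNat (Nat.mod_lt n (by norm_num))]
      omega

theorem toDigits_inj {m n : Nat} (h : Nat.toDigits 10 m = Nat.toDigits 10 n) : m = n := by
  have hm := decDigits_toDigitsCore (m + 1) m (by omega)
  have hn := decDigits_toDigitsCore (n + 1) n (by omega)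
  unfold Nat.toDigits at h
  rw [h] at hm
  omega

theorem isDigit_ne_dash {c : Char} (h : c.isDigit = true) : c ≠ '-' := by
  rintro rfl; simp [Char.isDigit] at h

theorem toDigits_head_ne_dash {n : Nat} {c : Char} {cs : List Char}
    (h : Nat.toDigits 10 n = c :: cs) : c ≠ '-' :=
  isDigit_ne_dash (toDigits_digits n c (h ▸ List.mem_cons_self))

theorem toChars_ne_nil (n : Int) : PySem.Int.toChars n ≠ [] := by
  unfold PySem.Int.toChars
  split
  · simp
  · exact toDigits_ne_nil _

theorem toChars_tail_no_dash (n : Int) : '-' ∉ (PySem.Int.toChars n).tail := by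
  unfold PySem.Int.toChars
  split
  · intro h
    exact isDigit_ne_dash (toDigits_digits _ _ (by simpa using h)) rfl
  · intro h
    exact isDigit_ne_dash (toDigits_digits _ _ (List.mem_of_mem_tail h)) rfl

theorem toChars_inj {m n : Int} (h : PySem.Int.toChars m = PySem.Int.toChars n) : m = n := by
  unfold PySem.Int.toChars at h
  split_ifs at h with h1 h2 h2
  · have := toDigits_inj (List.cons.injEq .. ▸ h).2
    omega
  · rcases hd : Nat.toDigits 10 n.toNat with _ | ⟨c, cs⟩
    · exact absurd hd (toDigits_ne_nil _)
    · rw [hd] at h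
      exact absurd (List.cons.injEq .. ▸ h).1.symm (toDigits_head_ne_dash hd)
  · rcases hd : Nat.toDigits 10 m.toNat with _ | ⟨c, cs⟩
    · exact absurd hd (toDigits_ne_nil _)
    · rw [hd] at h
      exact absurd (List.cons.injEq .. ▸ h).1 (toDigits_head_ne_dash hd)
  · have := toDigits_inj h
    omega

/- ## Splitting a key at the first '-' separator is unambiguous -/

theorem sep_split_aux : ∀ (t1 t2 r1 r2 : List Char), '-' ∉ t1 → '-' ∉ t2 →
    t1 ++ '-' :: r1 = t2 ++ '-' :: r2 → t1 = t2 ∧ r1 = r2 := by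
  intro t1
  induction t1 with
  | nil =>
    intro t2 r1 r2 _ h2 h
    cases t2 with
    | nil => simpa using h
    | cons b t2' =>
      simp only [List.nil_append, List.cons_append, List.cons.injEq] at h
      exact absurd (h.1 ▸ List.mem_cons_self) h2
  | cons a t1' ih =>
    intro t2 r1 r2 h1 h2 h
    cases t2 with
    | nil =>
      simp only [List.cons_append, List.nil_append, List.cons.injEq] at h
      exact absurd (h.1 ▸ List.mem_cons_self) h1
    | cons b t2' =>
      simp only [List.cons_append, List.cons.injEq] at h
      obtain ⟨rfl, h⟩ := h
      have := ih t2' r1 r2 (fun hm => h1 (List.mem_cons_of_mem _ hm))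
        (fun hm => h2 (List.mem_cons_of_mem _ hm)) h
      exact ⟨by rw [this.1], this.2⟩

theorem sep_split (l1 l2 r1 r2 : List Char) (h1 : l1 ≠ []) (h2 : l2 ≠ [])
    (t1 : '-' ∉ l1.tail) (t2 : '-' ∉ l2.tail)
    (h : l1 ++ '-' :: r1 = l2 ++ '-' :: r2) : l1 = l2 ∧ r1 = r2 := by
  cases l1 with
  | nil => exact absurd rfl h1
  | cons a l1' =>
    cases l2 with
    | nil => exact absurd rfl h2
    | cons b l2' =>
      simp only [List.cons_append, List.cons.injEq] at h
      obtain ⟨rfl, h⟩ := h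
      have := sep_split_aux l1' l2' r1 r2 t1 t2 h
      exact ⟨by rw [this.1], this.2⟩

theorem keyA_inj : Function.Injective keyA := by
  intro x y h
  unfold keyA at h
  have h1 := sep_split _ _ _ _ (toChars_ne_nil x.1) (toChars_ne_nil y.1)
    (toChars_tail_no_dash x.1) (toChars_tail_no_dash y.1) h
  have h2 := sep_split _ _ _ _ (toChars_ne_nil x.2.1) (toChars_ne_nil y.2.1)
    (toChars_tail_no_dash x.2.1) (toChars_tail_no_dash y.2.1) h1.2
  exact Prod.ext (toChars_inj h1.1) (Prod.ext (toChars_inj h2.1) (toChars_inj h2.2))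

/- ## The common quantity both programs compute: Σ_{distinct k} count(k) / 2 -/

def pairsOf {α : Type} [BEq α] [LawfulBEq α] (l : List α) : Nat :=
  ((PySem.Set.ofList l).map (fun k => l.count k / 2)).sum

theorem sum_map_update {α : Type} [DecidableEq α] (f g : α → Nat) (x : α) :
    ∀ (s : List α), s.Nodup → x ∈ s → (∀ k ∈ s, k ≠ x → f k = g k) →
    (s.map f).sum + g x = (s.map g).sum + f x := by
  intro s
  induction s with
  | nil => simp
  | cons a s ih =>
    intro hnd hx hagree
    obtain ⟨hna, hnds⟩ := List.nodup_cons.mp hnd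
    rcases List.mem_cons.mp hx with rfl | hx
    · have hs : ∀ k ∈ s, f k = g k := fun k hk =>
        hagree k (List.mem_cons_of_mem _ hk) (fun e => hna (e ▸ hk))
      simp only [List.map_cons, List.sum_cons]
      rw [List.map_congr_left hs]
      omega
    · have := ih hnds hx (fun k hk hke => hagree k (List.mem_cons_of_mem _ hk) hke)
      have ha : f a = g a := hagree a List.mem_cons_self (fun e => hna (e ▸ hx))
      simp only [List.map_cons, List.sum_cons]
      omega

theorem pairsOf_append {α : Type} [BEq α] [LawfulBEq α] [DecidableEq α] (l : List α) (x : α) :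
    pairsOf (l ++ [x]) = pairsOf l + (if l.count x % 2 = 1 then 1 else 0) := by
  unfold pairsOf
  rw [PySem.Set.ofList_append_singleton]
  by_cases hx : x ∈ l
  · rw [PySem.Set.add_of_mem (by simpa [PySem.Set.mem_ofList] using hx)]
    have hupd := sum_map_update (fun k => (l ++ [x]).count k / 2) (fun k => l.count k / 2) x
      (PySem.Set.ofList l) (PySem.Set.nodup_ofList l)
      (by simpa [PySem.Set.mem_ofList] using hx)
      (by
        intro k _ hk
        simp [List.count_append, Ne.symm hk])
    have hcx : (l ++ [x]).count x = l.count x + 1 := by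
      simp [List.count_append]
    simp only [hcx] at hupd
    by_cases hpar : l.count x % 2 = 1 <;> simp only [hpar, if_true, if_false] <;> omega
  · rw [PySem.Set.add_of_not_mem (by simpa [PySem.Set.mem_ofList] using hx)]
    have hcx : l.count x = 0 := by
      simp [List.count_eq_zero, hx]
    have hmap : (PySem.Set.ofList l).map (fun k => (l ++ [x]).count k / 2)
        = (PySem.Set.ofList l).map (fun k => l.count k / 2) := by
      refine List.map_congr_left ?_
      intro k hk
      have hkx : k ≠ x := fun e => hx (e ▸ ((PySem.Set.mem_ofList l k).mp hk))
      simp [List.count_append, Ne.symm hkx]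
    rw [List.map_append, List.sum_append, hmap, List.map_singleton, List.sum_singleton]
    have hone : (l ++ [x]).count x = 1 := by simp [List.count_append, hcx]
    simp [hone, hcx]

theorem pairsOf_map_inj {α β : Type} [BEq α] [LawfulBEq α] [DecidableEq α]
    [BEq β] [LawfulBEq β] [DecidableEq β]
    (f : α → β) (hf : Function.Injective f) (l : List α) :
    pairsOf (l.map f) = pairsOf l := by
  induction l using List.reverseRecOn with
  | nil => rfl
  | append_singleton l x ih =>
    rw [List.map_append, List.map_singleton, pairsOf_append, pairsOf_append, ih,
      List.count_map_of_injective l f hf x]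

theorem pairsOf_perm {α : Type} [BEq α] [LawfulBEq α] [DecidableEq α]
    {l l' : List α} (h : l.Perm l') : pairsOf l = pairsOf l' := by
  unfold pairsOf
  have hset : (PySem.Set.ofList l).Perm (PySem.Set.ofList l') := by
    rw [List.perm_ext_iff_of_nodup (PySem.Set.nodup_ofList l) (PySem.Set.nodup_ofList l')]
    intro a
    rw [PySem.Set.mem_ofList, PySem.Set.mem_ofList]
    exact ⟨fun hm => h.mem_iff.mp hm, fun hm => h.mem_iff.mpr hm⟩
  have hcount : ∀ k, l.count k = l'.count k := fun k => h.count_eq k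
  calc ((PySem.Set.ofList l).map (fun k => l.count k / 2)).sum
      = ((PySem.Set.ofList l).map (fun k => l'.count k / 2)).sum := by
        refine congrArg List.sum (List.map_congr_left ?_)
        intro k _; rw [hcount k]
    _ = ((PySem.Set.ofList l').map (fun k => l'.count k / 2)).sum :=
        (hset.map (fun k => l'.count k / 2)).sum_eq

theorem pairsOf_cons_of_not_mem {α : Type} [BEq α] [LawfulBEq α] [DecidableEq α]
    {x : α} {t : List α} (hx : x ∉ t) : pairsOf (x :: t) = pairsOf t := by
  have := pairsOf_perm (List.perm_append_singleton x t).symm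
  rw [this, pairsOf_append]
  have : t.count x = 0 := by simp [List.count_eq_zero, hx]
  simp [this]

theorem pairsOf_cons_cons_self {α : Type} [BEq α] [LawfulBEq α] [DecidableEq α]
    (x : α) (t : List α) : pairsOf (x :: x :: t) = pairsOf t + 1 := by
  have hperm : (x :: x :: t).Perm ((t ++ [x]) ++ [x]) :=
    (List.Perm.cons x (List.perm_append_singleton x t).symm).trans
      (List.perm_append_singleton x (t ++ [x])).symm
  rw [pairsOf_perm hperm, pairsOf_append, pairsOf_append]
  have hcx : (t ++ [x]).count x = t.count x + 1 := by simp [List.count_append]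
  rw [hcx]
  by_cases hpar : t.count x % 2 = 1
  · have : ¬ (t.count x + 1) % 2 = 1 := by omega
    simp [hpar, this]
  · have : (t.count x + 1) % 2 = 1 := by omega
    simp [hpar, this]

/- ## B's scan: on a list sorted by the (injective) lexicographic key, greedy adjacent
   pairing counts exactly Σ count/2 -/

theorem tkey_inj : Function.Injective tkey := by
  intro a b h
  unfold tkey at h
  simp [toLex, Prod.ext_iff] at h
  exact Prod.ext h.1 (Prod.ext h.2.1 h.2.2)

theorem countPairs_eq_pairsOf : ∀ (l : List (Int × Int × Int)),
    l.Pairwise (fun a b => tkey a ≤ tkey b) → countPairs l = (pairsOf l : Int) := by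
  intro l
  induction l using countPairs.induct with
  | case1 a b t hab ih =>
    intro hp
    have hab' : a = b := by simpa using hab
    subst hab'
    have hpt : t.Pairwise (fun a b => tkey a ≤ tkey b) :=
      ((List.pairwise_cons.mp (List.pairwise_cons.mp hp).2).2)
    rw [countPairs, if_pos (by simp), ih hpt, pairsOf_cons_cons_self]
    push_cast
    ring
  | case2 a b t hab ih =>
    intro hp
    have hab' : a ≠ b := by simpa using hab
    obtain ⟨ha, hp'⟩ := List.pairwise_cons.mp hp
    have hanotin : a ∉ b :: t := by
      intro hmem
      rcases List.mem_cons.mp hmem with rfl | hmem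
      · exact hab' rfl
      · have h1 : tkey a ≤ tkey b := ha b List.mem_cons_self
        have h2 : tkey b ≤ tkey a :=
          (List.pairwise_cons.mp hp').1 a hmem
        exact hab' (tkey_inj (le_antisymm h1 h2))
    rw [countPairs, if_neg (by simpa using hab'), ih hp', pairsOf_cons_of_not_mem hanotin]
  | case3 l hshape =>
    intro _
    rcases l with _ | ⟨x, _ | ⟨y, t⟩⟩
    · simp [countPairs, pairsOf]
    · rw [show countPairs [x] = 0 from rfl, pairsOf_cons_of_not_mem List.not_mem_nil]
      simp [pairsOf]
    · exact (hshape x y t rfl).elim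

/- ## A's Counter sum is pairsOf of its key list -/

theorem countA_eq (S : List (List Char)) :
    (((PySem.Dict.counter S).values).map (fun v => PySem.Int.floordiv v 2)).sum
      = (pairsOf S : Int) := by
  simp only [PySem.Dict.values, PySem.Dict.items_counter, List.map_map, pairsOf]
  rw [Nat.cast_list_sum, List.map_map]
  refine congrArg List.sum (List.map_congr_left ?_)
  intro k _
  simp [Function.comp]

-- ===== VERDICT (by name: the statement is the Claim_ definition above) =====
theorem check_iipeikou_spec : Claim_equal_check_iipeikou := by
  intro closed fixed _
  unfold Spec_check_iipeikou check_iipeikou check_iipeikou_alt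
  by_cases hf : fixed.length > 0
  · simp [hf]
  · simp only [if_neg hf]
    have hA := countA_eq ((closed.filter (fun m => m.1 != m.2.1)).map keyA)
    rw [pairsOf_map_inj keyA keyA_inj] at hA
    have hid : (closed.filter (fun m => m.1 != m.2.1)).map (fun m => (m.1, m.2.1, m.2.2))
        = closed.filter (fun m => m.1 != m.2.1) := by
      simp
    rw [hid]
    have hsorted := PySem.List.sorted_pairwise (closed.filter (fun m => m.1 != m.2.1)) tkey
    have hperm := PySem.List.sorted_perm (closed.filter (fun m => m.1 != m.2.1)) tkey false
    have hB := countPairs_eq_pairsOf _ hsorted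
    rw [pairsOf_perm hperm] at hB
    rw [hA, hB]
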